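-- pv_equiv track=rewrite | github.com/EtherVerseCodeMate/giza-cyber-shield | services/ml_anomaly/training/primordial_ingestion.py | _split_markdown
-- ===== SOURCE A (Python) =====
-- from typing import Dict, List, Optional, Tuple, Any
--
-- def _split_markdown(content: str) -> List[Tuple[str, str]]:
--     """Split markdown content by headers"""
--     chunks = []
--     current_header = "Introduction"
--     current_content = []
--
--     for line in content.split('\n'):
--         if line.startswith('#'):
--             # Save previous chunk
--             if current_content:
--                 chunks.append((current_header, '\n'.join(current_content)))
--             # Start new chunk
--             current_header = line.lstrip('#').strip()
--             current_content = [line]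
--         else:
--             current_content.append(line)
--
--     # Don't forget the last chunk
--     if current_content:
--         chunks.append((current_header, '\n'.join(current_content)))
--
--     return chunks
-- ===== SOURCE B (Python) =====
-- from typing import Dict, List, Optional, Tuple, Any
--
-- def _span_nonheader(lines):
--     """Split lines into (leading non-header lines, remainder starting at the first header)."""
--     for i, line in enumerate(lines):
--         if line.startswith('#'):
--             return lines[:i], lines[i:]
--     return lines, []
--
-- def _split_markdown(content: str) -> List[Tuple[str, str]]:
--     """Split markdown content by headers (group-at-a-time span decomposition)."""
--     lines = content.split('\n')
--     intro, rest = _span_nonheader(lines)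
--     chunks = [("Introduction", '\n'.join(intro))] if intro else []
--     while rest:
--         body, rest2 = _span_nonheader(rest[1:])
--         chunks.append((rest[0].lstrip('#').strip(), '\n'.join([rest[0]] + body)))
--         rest = rest2
--     return chunks
-- ===== Notes on version B (the rewrite author's own statement) =====
-- stated objective: alternative
-- what changed: Replaces A's single accumulate-and-flush loop with mutable header/content state by a group-at-a-time decomposition: a span helper splits off the leading non-header lines, then an outer loop emits one chunk per header group (header line plus its following non-header lines).
import Mathlib
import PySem

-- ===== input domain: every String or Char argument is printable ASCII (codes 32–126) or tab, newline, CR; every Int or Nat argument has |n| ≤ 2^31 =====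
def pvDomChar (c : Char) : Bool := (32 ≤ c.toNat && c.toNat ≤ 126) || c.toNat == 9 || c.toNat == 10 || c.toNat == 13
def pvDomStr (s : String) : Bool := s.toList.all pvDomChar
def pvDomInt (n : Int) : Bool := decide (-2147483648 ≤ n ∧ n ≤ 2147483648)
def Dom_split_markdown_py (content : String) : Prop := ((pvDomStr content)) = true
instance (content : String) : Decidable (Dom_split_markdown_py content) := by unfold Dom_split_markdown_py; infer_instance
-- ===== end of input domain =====

-- B replaces A's accumulate-and-flush loop by a group-at-a-time span decomposition (same cost; objective: alternative).

-- shared by both ports: line.lstrip('#').strip(); dropWhile on '#' is exact for lstrip with a one-char set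
def cleanHeader (line : String) : String :=
  PySem.Str.strip (String.ofList (line.toList.dropWhile (fun c => c == '#')))

-- ===== PORT A =====
def aStep (st : List (String × String) × String × List String) (line : String) :
    List (String × String) × String × List String :=
  if PySem.Str.startswith line "#" = true then
    ((if st.2.2.isEmpty then st.1 else st.1 ++ [(st.2.1, PySem.Str.join "\n" st.2.2)]),
     cleanHeader line, [line])
  else
    (st.1, st.2.1, st.2.2 ++ [line])

def split_markdown_py (content : String) : List (String × String) :=
  let st := ((PySem.Str.split? content "\n").getD []).foldl aStep ([], "Introduction", [])
  if st.2.2.isEmpty then st.1 else st.1 ++ [(st.2.1, PySem.Str.join "\n" st.2.2)]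

-- ===== PORT B =====
-- Source B's _span_nonheader: (leading non-header lines, remainder from the first header)
def spanNonheader : List String → List String × List String
  | [] => ([], [])
  | l :: ls =>
    if PySem.Str.startswith l "#" = true then ([], l :: ls)
    else
      let p := spanNonheader ls
      (l :: p.1, p.2)

theorem spanNonheader_snd_len : ∀ ls : List String, (spanNonheader ls).2.length ≤ ls.length := by
  intro ls
  induction ls with
  | nil => simp [spanNonheader]
  | cons l ls ih =>
    simp only [spanNonheader]
    split
    · simp
    · exact Nat.le_succ_of_le ih

-- Source B's while loop over the remainder: one chunk per header group
def altGo : List String → List (String × String)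
  | [] => []
  | h :: tail =>
    let p := spanNonheader tail
    (cleanHeader h, PySem.Str.join "\n" (h :: p.1)) :: altGo p.2
termination_by l => l.length
decreasing_by
  exact Nat.lt_succ_of_le (spanNonheader_snd_len tail)

def split_markdown_py_alt (content : String) : List (String × String) :=
  let lines := (PySem.Str.split? content "\n").getD []
  let p := spanNonheader lines
  (if p.1.isEmpty then [] else [("Introduction", PySem.Str.join "\n" p.1)]) ++ altGo p.2

-- ===== PRECONDITION & SPEC =====
def Spec_split_markdown_py (content : String) (out : List (String × String)) : Prop := out = split_markdown_py_alt content
instance (content : String) (out : List (String × String)) : Decidable (Spec_split_markdown_py content out) := by unfold Spec_split_markdown_py; infer_instance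

-- ===== CLAIM (what is proved, stated in full; the proofs are below) =====
def Claim_equal_split_markdown_py : Prop := ∀ (content : String), Dom_split_markdown_py content → Spec_split_markdown_py content (split_markdown_py content)

-- ===== LEMMAS AND PROOFS =====
theorem loop_span (lines : List String) :
    ∀ (chunks : List (String × String)) (header : String) (cur : List String),
      (let st := lines.foldl aStep (chunks, header, cur)
       if st.2.2.isEmpty then st.1 else st.1 ++ [(st.2.1, PySem.Str.join "\n" st.2.2)])
      = chunks
        ++ (if (cur ++ (spanNonheader lines).1).isEmpty then []
            else [(header, PySem.Str.join "\n" (cur ++ (spanNonheader lines).1))])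
        ++ altGo (spanNonheader lines).2 := by
  induction lines with
  | nil =>
    intro chunks header cur
    simp only [spanNonheader, List.foldl_nil, List.append_nil, altGo]
    split <;> simp
  | cons l ls ih =>
    intro chunks header cur
    by_cases h : PySem.Str.startswith l "#" = true
    · simp only [List.foldl_cons, aStep, h, if_true, spanNonheader, ih, altGo]
      split <;> split <;> simp_all [List.isEmpty_iff, List.append_assoc]
    · simp only [List.foldl_cons, aStep, h, spanNonheader, ih]
      simp [List.append_assoc]

-- ===== VERDICT (by name: the statement is the Claim_ definition above) =====
theorem split_markdown_py_spec : Claim_equal_split_markdown_py := by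
  intro content _
  unfold Spec_split_markdown_py split_markdown_py split_markdown_py_alt
  have := loop_span ((PySem.Str.split? content "\n").getD []) [] "Introduction" []
  simpa using this
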